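-- pv_equiv track=rewrite | github.com/blasfir/asym-crypto-lab3 | 1.py | sqrt_mod_blum
-- ===== SOURCE A (Python) =====
-- def egcd(a, b):
--     if b == 0:
--         return (1, 0, a)
--     x, y, g = egcd(b, a % b)
--     return (y, x - (a // b) * y, g)
--
-- def sqrt_mod_blum(y, p, q):
--     s1 = pow(y, (p + 1) // 4, p)
--     s2 = pow(y, (q + 1) // 4, q)
--
--     u, v, _ = egcd(p, q)
--     roots = []
--     for sign1 in (1, -1):
--         for sign2 in (1, -1):
--             r = (sign1 * u * p * s2 + sign2 * v * q * s1) % (p * q)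
--             roots.append(r)
--
--     return roots
-- ===== SOURCE B (Python) =====
-- def sqrt_mod_blum(y, p, q):
--     s1 = pow(y, (p + 1) // 4, p)
--     s2 = pow(y, (q + 1) // 4, q)
--     n = p * q
--     # iterative extended Euclid tracking only the p-coefficient u;
--     # the q-coefficient is recovered by exact division from u*p + v*q == g
--     r0, r1, u0, u1 = p, q, 1, 0
--     while r1 != 0:
--         k = r0 // r1
--         r0, r1 = r1, r0 - k * r1
--         u0, u1 = u1, u0 - k * u1
--     v0 = (r0 - u0 * p) // q
--     a = u0 * p * s2
--     b = v0 * q * s1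
--     root1 = (a + b) % n
--     root2 = (a - b) % n
--     return [root1, root2, (-root2) % n, (-root1) % n]
-- ===== Notes on version B (the rewrite author's own statement) =====
-- stated objective: simpler
-- what changed: B replaces A's recursive two-coefficient egcd and 2x2 sign loop by an iterative extended Euclid that tracks only the p-coefficient (recovering the q-coefficient by exact division from the Bezout identity) and returns [r1, r2, (-r2)%n, (-r1)%n] using the +/- symmetry of the two roots r1=(a+b)%n, r2=(a-b)%n.
import Mathlib
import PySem

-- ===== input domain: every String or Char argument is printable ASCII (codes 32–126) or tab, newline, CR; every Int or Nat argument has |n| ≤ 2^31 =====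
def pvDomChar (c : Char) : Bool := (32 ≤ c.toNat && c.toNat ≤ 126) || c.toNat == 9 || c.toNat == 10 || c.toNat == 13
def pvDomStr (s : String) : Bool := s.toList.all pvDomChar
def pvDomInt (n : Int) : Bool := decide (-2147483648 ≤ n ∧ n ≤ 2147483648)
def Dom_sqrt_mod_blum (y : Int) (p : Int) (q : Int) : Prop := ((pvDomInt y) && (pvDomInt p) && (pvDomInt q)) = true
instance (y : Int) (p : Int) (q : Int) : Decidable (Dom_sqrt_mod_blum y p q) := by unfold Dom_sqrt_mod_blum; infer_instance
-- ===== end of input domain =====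

-- B replaces A's recursive two-coefficient egcd and 2x2 sign loop by an iterative extended
-- Euclid that tracks only the p-coefficient (the q-coefficient recovered by exact division)
-- and the ± symmetry of the two CRT roots (objective: simpler decomposition, same cost).

-- ===== PORT A =====
-- termination helper for the Euclid recursions (cited by decreasing_by)
theorem pvNatAbsModLt (a b : Int) (h : b ≠ 0) : (PySem.Int.mod a b).natAbs < b.natAbs := by
  rcases lt_trichotomy b 0 with hb | hb | hb
  · have hmn := PySem.Int.mod_neg_neg a b
    have h1 : 0 ≤ Int.fmod (-a) (-b) := Int.fmod_nonneg_of_pos _ (by omega)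
    have h2 : Int.fmod (-a) (-b) < -b := Int.fmod_lt_of_pos _ (by omega)
    simp only [PySem.Int.mod] at hmn ⊢
    omega
  · exact absurd hb h
  · have h1 : 0 ≤ Int.fmod a b := Int.fmod_nonneg_of_pos _ hb
    have h2 : Int.fmod a b < b := Int.fmod_lt_of_pos _ hb
    simp only [PySem.Int.mod]
    omega

def egcdA (a b : Int) : Int × Int × Int :=
  if _h : b = 0 then (1, 0, a)
  else
    match egcdA b (PySem.Int.mod a b) with
    | (x, y, g) => (y, x - (PySem.Int.floordiv a b) * y, g)
termination_by b.natAbs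
decreasing_by exact pvNatAbsModLt a b _h

-- hand-port of Python's three-argument pow, exact on every m ≠ 0 (hand-written because
-- PySem.Int.powMod computes b ^ e literally, which the generated 2^31-sized exponents cannot
-- afford at evaluation time): square-and-multiply, congruent to b^k and reduced into [0, m) …
def pmA (b : Int) (k : Nat) (m : Int) : Int :=
  if _h : k = 0 then PySem.Int.mod 1 m
  else
    let r := pmA b (k / 2) m
    let r2 := PySem.Int.mod (r * r) m
    if k % 2 = 1 then PySem.Int.mod (r2 * b) m else r2
termination_by k
decreasing_by exact Nat.div_lt_self (Nat.pos_of_ne_zero _h) (by norm_num)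

-- … then moved to Python's residue range (m, 0] when the modulus is negative
def powPyA (b : Int) (k : Nat) (m : Int) : Int :=
  if 0 ≤ m then pmA b k m
  else
    let r := pmA b k (-m)
    if r = 0 then 0 else r + m

-- negative exponent: Python inverts the base mod m via extended gcd; the inverse
-- representative u*g is in the same residue class mod m as CPython's, so powPyA (which
-- reduces mod m) yields the identical value; where Python raises (no inverse) is outside Pre_.
def pyPowA (b : Int) (e : Int) (m : Int) : Int :=
  if 0 ≤ e then powPyA b e.toNat m
  else
    match egcdA b m with
    | (u, _, g) => powPyA (u * g) (-e).toNat m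

def sqrt_mod_blum (y : Int) (p : Int) (q : Int) : List Int :=
  let s1 := pyPowA y (PySem.Int.floordiv (p + 1) 4) p
  let s2 := pyPowA y (PySem.Int.floordiv (q + 1) 4) q
  match egcdA p q with
  | (u, v, _) =>
    ([(1 : Int), -1]).foldl (fun roots sign1 =>
      ([(1 : Int), -1]).foldl (fun roots sign2 =>
        roots ++ [PySem.Int.mod (sign1 * u * p * s2 + sign2 * v * q * s1) (p * q)]) roots) []

-- ===== PORT B =====
-- B's while-loop: iterative extended Euclid carrying only the remainder pair and the
-- p-coefficient pair; returns (u0, r0) = (p-coefficient, gcd value)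
def egcdLoop (r0 r1 u0 u1 : Int) : Int × Int :=
  if _h : r1 = 0 then (u0, r0)
  else
    egcdLoop r1 (r0 - PySem.Int.floordiv r0 r1 * r1) u1 (u0 - PySem.Int.floordiv r0 r1 * u1)
termination_by r1.natAbs
decreasing_by
  have : r0 - PySem.Int.floordiv r0 r1 * r1 = PySem.Int.mod r0 r1 := by
    simp only [PySem.Int.mod, PySem.Int.floordiv, Int.fmod_def]; ring
  rw [this]; exact pvNatAbsModLt r0 r1 _h

-- B-side hand-port of the same builtin pow (see pmA's comment): iterative right-to-left
-- binary exponentiation over a running accumulator, every product reduced by m directly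
-- (Python's % already lands in m's residue range, also for negative m)
def pmLoopB (base acc : Int) (k : Nat) (m : Int) : Int :=
  if _h : k = 0 then acc
  else
    pmLoopB (PySem.Int.mod (base * base) m)
      (if k % 2 = 1 then PySem.Int.mod (acc * base) m else acc) (k / 2) m
termination_by k
decreasing_by exact Nat.div_lt_self (Nat.pos_of_ne_zero _h) (by norm_num)

-- negative exponent inverted via B's iterative extended Euclid (same residue class as CPython)
def pyPowB (b : Int) (e : Int) (m : Int) : Int :=
  if 0 ≤ e then pmLoopB b (PySem.Int.mod 1 m) e.toNat m
  else
    match egcdLoop b m 1 0 with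
    | (u, g) => pmLoopB (u * g) (PySem.Int.mod 1 m) (-e).toNat m

def sqrt_mod_blum_alt (y : Int) (p : Int) (q : Int) : List Int :=
  let s1 := pyPowB y (PySem.Int.floordiv (p + 1) 4) p
  let s2 := pyPowB y (PySem.Int.floordiv (q + 1) 4) q
  let n := p * q
  match egcdLoop p q 1 0 with
  | (u0, g) =>
    let v0 := PySem.Int.floordiv (g - u0 * p) q
    let a := u0 * p * s2
    let b := v0 * q * s1
    let root1 := PySem.Int.mod (a + b) n
    let root2 := PySem.Int.mod (a - b) n
    [root1, root2, PySem.Int.mod (-root2) n, PySem.Int.mod (-root1) n]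

-- ===== PRECONDITION & SPEC =====
-- Pre_ excludes exactly the inputs where Python A raises: a zero modulus (pow(…, 0) is a
-- ValueError) or a negative exponent (p ≤ -2 resp. q ≤ -2) with a base not invertible mod the
-- modulus (pow raises ValueError); A returns on every input satisfying Pre_.
def Pre_sqrt_mod_blum (y : Int) (p : Int) (q : Int) : Prop :=
  p ≠ 0 ∧ q ≠ 0 ∧
  (PySem.Int.floordiv (p + 1) 4 < 0 → Int.gcd y p = 1) ∧
  (PySem.Int.floordiv (q + 1) 4 < 0 → Int.gcd y q = 1)
instance (y : Int) (p : Int) (q : Int) : Decidable (Pre_sqrt_mod_blum y p q) := by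
  unfold Pre_sqrt_mod_blum; infer_instance

def pvWitness_sqrt_mod_blum : Int × Int × Int := (4, 7, 11)

def Spec_sqrt_mod_blum (y : Int) (p : Int) (q : Int) (out : List Int) : Prop := out = sqrt_mod_blum_alt y p q
instance (y : Int) (p : Int) (q : Int) (out : List Int) : Decidable (Spec_sqrt_mod_blum y p q out) := by unfold Spec_sqrt_mod_blum; infer_instance

-- ===== CLAIM (what is proved, stated in full; the proofs are below) =====
def Claim_equal_sqrt_mod_blum : Prop := ∀ (y : Int) (p : Int) (q : Int), Dom_sqrt_mod_blum y p q → Pre_sqrt_mod_blum y p q → Spec_sqrt_mod_blum y p q (sqrt_mod_blum y p q)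

-- ===== LEMMAS AND PROOFS =====

-- B's iterative loop computes A's recursive egcd applied linearly to its u-accumulators.
theorem egcdLoop_spec (r0 r1 u0 u1 : Int) :
    egcdLoop r0 r1 u0 u1 =
      ((egcdA r0 r1).1 * u0 + (egcdA r0 r1).2.1 * u1, (egcdA r0 r1).2.2) := by
  induction r0, r1, u0, u1 using egcdLoop.induct with
  | case1 r0 u0 u1 =>
    rw [egcdLoop, egcdA]; simp
  | case2 r0 r1 u0 u1 h ih =>
    rw [egcdLoop]
    simp only [h, dite_false]
    rw [ih]
    conv_rhs => rw [egcdA]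
    simp only [h, dite_false]
    have hm : PySem.Int.mod r0 r1 = r0 - PySem.Int.floordiv r0 r1 * r1 := by
      simp only [PySem.Int.mod, PySem.Int.floordiv, Int.fmod_def]; ring
    rw [hm]
    rcases hE : egcdA r1 (r0 - PySem.Int.floordiv r0 r1 * r1) with ⟨x, yy, g⟩
    refine Prod.ext ?_ rfl
    simp; ring

theorem egcdLoop_eq (a b : Int) :
    egcdLoop a b 1 0 = ((egcdA a b).1, (egcdA a b).2.2) := by
  rw [egcdLoop_spec]; simp

-- Bézout identity of A's egcd, used to recover B's q-coefficient by exact division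
theorem egcdA_bezout (a b : Int) :
    (egcdA a b).1 * a + (egcdA a b).2.1 * b = (egcdA a b).2.2 := by
  induction a, b using egcdA.induct with
  | case1 a => rw [egcdA]; simp
  | case2 a b h x yy g hE ih =>
    rw [egcdA]
    simp only [h, dite_false, hE]
    rw [hE] at ih
    simp only at ih ⊢
    have hm : PySem.Int.mod a b = a - PySem.Int.floordiv a b * b := by
      simp only [PySem.Int.mod, PySem.Int.floordiv, Int.fmod_def]; ring
    rw [hm] at ih
    nlinarith [ih]

-- fmod congruence toolkit
theorem pvMulModLeft (a b m : Int) :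
    PySem.Int.mod (PySem.Int.mod a m * b) m = PySem.Int.mod (a * b) m := by
  simp only [PySem.Int.mod]
  rw [Int.fmod_def a m]
  have h : (a - m * a.fdiv m) * b = a * b + m * (-(a.fdiv m * b)) := by ring
  rw [h, Int.add_mul_fmod_self_left]

theorem pvMulModRight (a b m : Int) :
    PySem.Int.mod (a * PySem.Int.mod b m) m = PySem.Int.mod (a * b) m := by
  rw [mul_comm a (PySem.Int.mod b m), pvMulModLeft, mul_comm]

theorem pvPowMod (c m : Int) (j : Nat) :
    PySem.Int.mod ((PySem.Int.mod c m) ^ j) m = PySem.Int.mod (c ^ j) m := by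
  induction j with
  | zero => simp
  | succ j ih =>
    calc PySem.Int.mod ((PySem.Int.mod c m) ^ (j + 1)) m
        = PySem.Int.mod ((PySem.Int.mod c m) ^ j * c) m := by
          rw [pow_succ, pvMulModRight]
      _ = PySem.Int.mod (PySem.Int.mod ((PySem.Int.mod c m) ^ j) m * c) m := by
          rw [pvMulModLeft]
      _ = PySem.Int.mod (c ^ j * c) m := by rw [ih, pvMulModLeft]
      _ = PySem.Int.mod (c ^ (j + 1)) m := by rw [pow_succ]

-- uniqueness of the fmod representative: any y congruent to x and inside m's residue range
theorem pvFmodUnique (x y m : Int) (hm : m ≠ 0) (hd : m ∣ (x - y))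
    (hr : (0 < m ∧ 0 ≤ y ∧ y < m) ∨ (m < 0 ∧ m < y ∧ y ≤ 0)) :
    PySem.Int.mod x m = y := by
  have hb : (0 < m ∧ 0 ≤ PySem.Int.mod x m ∧ PySem.Int.mod x m < m) ∨
      (m < 0 ∧ m < PySem.Int.mod x m ∧ PySem.Int.mod x m ≤ 0) := by
    rcases lt_trichotomy m 0 with h | h | h
    · right
      have hmn := PySem.Int.mod_neg_neg (-x) (-m)
      have h1 : 0 ≤ Int.fmod (-x) (-m) := Int.fmod_nonneg_of_pos _ (by omega)
      have h2 : Int.fmod (-x) (-m) < -m := Int.fmod_lt_of_pos _ (by omega)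
      simp only [PySem.Int.mod, neg_neg] at hmn h1 h2 ⊢
      omega
    · exact absurd h hm
    · exact Or.inl ⟨h, Int.fmod_nonneg_of_pos _ h, Int.fmod_lt_of_pos _ h⟩
  have hdm : m ∣ (PySem.Int.mod x m - y) := by
    have hx : x - PySem.Int.mod x m = m * x.fdiv m := by
      simp only [PySem.Int.mod, Int.fmod_def]; ring
    have h1 : m ∣ (x - PySem.Int.mod x m) := ⟨x.fdiv m, hx⟩
    have h2 : PySem.Int.mod x m - y = (x - y) - (x - PySem.Int.mod x m) := by ring
    rw [h2]; exact dvd_sub hd h1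
  have habs : |PySem.Int.mod x m - y| < |m| := by
    rcases hb with ⟨h1, h2, h3⟩ | ⟨h1, h2, h3⟩ <;> rcases hr with ⟨g1, g2, g3⟩ | ⟨g1, g2, g3⟩ <;>
      (try omega) <;> rw [abs_lt] <;> constructor <;> simp only [abs_of_pos, abs_of_neg, g1] <;> omega
  have : PySem.Int.mod x m - y = 0 :=
    Int.eq_zero_of_abs_lt_dvd ((abs_dvd m _).mpr hdm) habs
  omega

-- A's recursive square-and-multiply computes the canonical residue of b^k
theorem pmA_spec (b : Int) (k : Nat) (m : Int) : pmA b k m = PySem.Int.mod (b ^ k) m := by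
  induction k using Nat.strong_induction_on generalizing b with
  | _ k ih =>
    rw [pmA]
    by_cases h : k = 0
    · subst h; simp
    · simp only [h, dite_false]
      have hk : k / 2 < k := Nat.div_lt_self (Nat.pos_of_ne_zero h) (by norm_num)
      rw [ih (k / 2) hk b]
      have hr2 : PySem.Int.mod (PySem.Int.mod (b ^ (k / 2)) m * PySem.Int.mod (b ^ (k / 2)) m) m
          = PySem.Int.mod (b ^ (2 * (k / 2))) m := by
        rw [pvMulModLeft, pvMulModRight, two_mul, pow_add]
      by_cases ho : k % 2 = 1
      · simp only [ho, if_true]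
        rw [hr2, pvMulModLeft]
        have : b ^ (2 * (k / 2)) * b = b ^ k := by
          rw [← pow_succ]; congr 1; omega
        rw [this]
      · simp only [ho, if_false]
        rw [hr2]
        congr 1; congr 1; omega

-- … and A's wrapper lands in Python's residue range for every sign of m
theorem powPyA_spec (b : Int) (k : Nat) (m : Int) (hm : m ≠ 0) :
    powPyA b k m = PySem.Int.mod (b ^ k) m := by
  unfold powPyA
  by_cases h : 0 ≤ m
  · simp only [h, if_true, pmA_spec]
  · simp only [h, if_false, pmA_spec]
    have hmneg : m < 0 := by omega
    have hnm : (0 : Int) < -m := by omega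
    have h1 : 0 ≤ Int.fmod (b ^ k) (-m) := Int.fmod_nonneg_of_pos _ hnm
    have h2 : Int.fmod (b ^ k) (-m) < -m := Int.fmod_lt_of_pos _ hnm
    have hdv : m ∣ (b ^ k - PySem.Int.mod (b ^ k) (-m)) := by
      have : b ^ k - PySem.Int.mod (b ^ k) (-m) = (-m) * Int.fdiv (b ^ k) (-m) := by
        simp only [PySem.Int.mod, Int.fmod_def]; ring
      exact ⟨-(Int.fdiv (b ^ k) (-m)), by rw [this]; ring⟩
    by_cases hz : PySem.Int.mod (b ^ k) (-m) = 0
    · simp only [hz, if_true]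
      refine (pvFmodUnique _ 0 m hm ?_ (Or.inr ⟨hmneg, by omega, le_refl 0⟩)).symm
      simpa [hz] using hdv
    · simp only [hz, if_false]
      refine (pvFmodUnique _ _ m hm ?_ ?_).symm
      · have : b ^ k - (PySem.Int.mod (b ^ k) (-m) + m)
            = (b ^ k - PySem.Int.mod (b ^ k) (-m)) + m * (-1) := by ring
        rw [this]; exact dvd_add hdv ⟨-1, rfl⟩
      · right
        simp only [PySem.Int.mod] at hz h1 h2 ⊢
        omega

-- B's iterative loop: invariant over the reduced accumulator
theorem pmLoopB_spec (k : Nat) (base a m : Int) :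
    pmLoopB base (PySem.Int.mod a m) k m = PySem.Int.mod (a * base ^ k) m := by
  induction k using Nat.strong_induction_on generalizing base a with
  | _ k ih =>
    rw [pmLoopB]
    by_cases h : k = 0
    · subst h; simp
    · simp only [h, dite_false]
      have hk : k / 2 < k := Nat.div_lt_self (Nat.pos_of_ne_zero h) (by norm_num)
      have hsq : ∀ a' : Int, PySem.Int.mod (a' * (PySem.Int.mod (base * base) m) ^ (k / 2)) m
          = PySem.Int.mod (a' * (base * base) ^ (k / 2)) m := by
        intro a'
        rw [← pvMulModRight a' ((base * base) ^ (k / 2)) m, ← pvPowMod, pvMulModRight]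
      by_cases ho : k % 2 = 1
      · simp only [ho, if_true]
        rw [pvMulModLeft, ih (k / 2) hk _ (a * base), hsq]
        congr 1
        have hb : base * base = base ^ 2 := (sq base).symm
        rw [hb, ← pow_mul]
        have : a * base * base ^ (2 * (k / 2)) = a * (base ^ (2 * (k / 2)) * base) := by ring
        rw [this, ← pow_succ]
        congr 2; omega
      · simp only [ho, if_false]
        rw [ih (k / 2) hk _ a, hsq]
        congr 1
        have hb : base * base = base ^ 2 := (sq base).symm
        rw [hb, ← pow_mul]
        congr 2; omega

-- the two ports of the builtin pow agree (both canonical)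
theorem pyPow_eq (b e m : Int) (hm : m ≠ 0) : pyPowA b e m = pyPowB b e m := by
  unfold pyPowA pyPowB
  by_cases h : 0 ≤ e
  · simp only [h, if_true, powPyA_spec _ _ _ hm, pmLoopB_spec, one_mul]
  · simp only [h, if_false, egcdLoop_eq]
    rcases hE : egcdA b m with ⟨u, v, g⟩
    simp only [powPyA_spec _ _ _ hm, pmLoopB_spec, one_mul]

-- negating a Python remainder and reducing again equals reducing the negated value
theorem mod_neg_mod (x n : Int) :
    PySem.Int.mod (-(PySem.Int.mod x n)) n = PySem.Int.mod (-x) n := by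
  simp only [PySem.Int.mod]
  have h1 : -(x.fmod n) = -x + n * x.fdiv n := by rw [Int.fmod_def]; ring
  rw [h1, Int.add_mul_fmod_self_left]

-- ===== VERDICT (by name: the statement is the Claim_ definition above) =====
theorem sqrt_mod_blum_spec : Claim_equal_sqrt_mod_blum := by
  intro y p q _ hPre
  obtain ⟨hp, hq, -, -⟩ := hPre
  unfold Spec_sqrt_mod_blum sqrt_mod_blum sqrt_mod_blum_alt
  rcases hE : egcdA p q with ⟨u, v, g⟩
  have hv : PySem.Int.floordiv (g - u * p) q = v := by
    have hb := egcdA_bezout p q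
    rw [hE] at hb
    simp only at hb
    have : g - u * p = v * q := by linarith
    simp only [PySem.Int.floordiv, this]
    exact Int.mul_fdiv_cancel v hq
  simp only [egcdLoop_eq, pyPow_eq _ _ _ hp, pyPow_eq _ _ _ hq, hE, hv,
    List.foldl, List.nil_append, List.cons_append]
  set s1 := pyPowB y (PySem.Int.floordiv (p + 1) 4) p
  set s2 := pyPowB y (PySem.Int.floordiv (q + 1) 4) q
  simp only [List.cons.injEq, and_true]
  refine ⟨by congr 1; ring, by congr 1; ring, ?_, ?_⟩
  · rw [mod_neg_mod]; congr 1; ring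
  · rw [mod_neg_mod]; congr 1; ring
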